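-- pv_equiv track=rewrite | github.com/kky990826/algorithm-daily-commit | 2025-06-28/get_correct_parentheses.py | change_to_correct_parenthesis
-- ===== SOURCE A (Python) =====
-- def is_correct_parenthesis(string):
--     stack = []
--     for i in range(len(string)):
--         if string[i] == "(":
--             stack.append("(")
--         elif string[i] == ")":
--             if len(stack) == 0:
--                 return False
--             stack.pop()
--     if len(stack) !=0:
--         return False
--     else:
--         return True
--
-- def separate_to_u_v(string):
--     left = right = 0
--     for i, ch in enumerate(string):
--         if ch == "(": left += 1
--         else:         right += 1
--         if left == right:
--             return string[:i+1], string[i+1:]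
--     return string, ""
--
-- def reverse_parenthesis(string):
--     reversed_string = ""
--     for char in string:
--         if char == "(":
--             reversed_string += ")"
--         elif char == ")":
--             reversed_string += "("
--     return reversed_string
--
-- def change_to_correct_parenthesis(balanced_parentheses_string):
--     if balanced_parentheses_string == "":
--         return ""
--     u, v = separate_to_u_v(balanced_parentheses_string)
--     if is_correct_parenthesis(u):
--         return u + change_to_correct_parenthesis(v)
--     else:
--         return "(" + change_to_correct_parenthesis(v) + ")" + reverse_parenthesis(u[1:-1])
-- ===== SOURCE B (Python) =====
-- def _valid(seg):
--     depth = 0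
--     for c in seg:
--         if c == "(":
--             depth += 1
--         elif c == ")":
--             depth -= 1
--             if depth < 0:
--                 return False
--     return depth == 0
--
--
-- def _flip(seg):
--     return "".join("(" if c == ")" else ")" for c in seg if c in "()")
--
--
-- def change_to_correct_parenthesis(balanced_parentheses_string):
--     s = balanced_parentheses_string
--     # one pass: cut into minimal segments where the running balance returns to 0
--     segments = []
--     bal = 0
--     start = 0
--     for j, c in enumerate(s):
--         bal += 1 if c == "(" else -1
--         if bal == 0:
--             segments.append(s[start:j + 1])
--             start = j + 1
--     if start < len(s):
--         segments.append(s[start:])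
--     prefixes = []
--     suffixes = []
--     for seg in segments:
--         if _valid(seg):
--             prefixes.append(seg)
--         else:
--             prefixes.append("(")
--             suffixes.append(")" + _flip(seg[1:-1]))
--     return "".join(prefixes) + "".join(suffixes[::-1])
-- ===== Notes on version B (the rewrite author's own statement) =====
-- stated objective: alternative
-- what changed: Replaces A's recursion (one recursive call per balanced segment, re-concatenating strings around each recursive result) by a single left-to-right segmentation pass with one running balance counter, a classification loop collecting prefix and suffix lists, and two joins; the stack-based validity check becomes a depth counter.
import Mathlib
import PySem

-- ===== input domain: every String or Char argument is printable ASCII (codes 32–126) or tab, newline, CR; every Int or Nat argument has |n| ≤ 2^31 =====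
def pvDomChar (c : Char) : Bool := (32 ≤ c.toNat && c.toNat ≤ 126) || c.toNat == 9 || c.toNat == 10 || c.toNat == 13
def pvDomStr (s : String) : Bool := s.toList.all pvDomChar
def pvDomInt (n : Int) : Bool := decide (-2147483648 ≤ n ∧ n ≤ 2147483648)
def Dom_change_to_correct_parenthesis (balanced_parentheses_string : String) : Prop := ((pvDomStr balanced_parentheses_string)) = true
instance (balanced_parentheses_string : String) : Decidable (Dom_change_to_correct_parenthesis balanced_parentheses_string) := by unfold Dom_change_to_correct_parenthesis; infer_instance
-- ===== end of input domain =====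

-- B replaces A's recursion (one recursive call per balanced segment, with string
-- re-concatenation around it) by a single left-to-right segmentation pass tracking one
-- balance counter, a classification fold into prefix/suffix lists, and two joins
-- (objective: simpler/alternative decomposition).

-- ===== PORT A =====

-- is_correct_parenthesis: explicit stack, early-return False on pop from empty
def pvIsCorrGo (stack : List Char) : List Char → Bool
  | [] => stack.isEmpty
  | c :: rest =>
    if c = '(' then pvIsCorrGo ('(' :: stack) rest
    else if c = ')' then
      match stack with
      | [] => false
      | _ :: st => pvIsCorrGo st rest
    else pvIsCorrGo stack rest

-- separate_to_u_v: left/right counters; acc holds the already-scanned prefix reversed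
def pvSepGo (acc : List Char) (left right : Int) : List Char → List Char × List Char
  | [] => (acc.reverse, [])
  | c :: rest =>
    let l := if c = '(' then left + 1 else left
    let r := if c = '(' then right else right + 1
    if l = r then ((c :: acc).reverse, rest) else pvSepGo (c :: acc) l r rest

-- reverse_parenthesis: string accumulator, append per char
def pvRevGo (acc : List Char) : List Char → List Char
  | [] => acc
  | c :: rest =>
    if c = '(' then pvRevGo (acc ++ [')']) rest
    else if c = ')' then pvRevGo (acc ++ ['(']) rest
    else pvRevGo acc rest

theorem pvSepGo_snd_le (rest : List Char) : ∀ (acc : List Char) (left right : Int),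
    (pvSepGo acc left right rest).2.length ≤ rest.length := by
  induction rest with
  | nil => intro acc left right; simp [pvSepGo]
  | cons c rest ih =>
    intro acc left right
    simp only [pvSepGo]
    split <;> split
    · simpa using Nat.le_succ rest.length
    · exact le_trans (ih _ _ _) (Nat.le_succ _)
    · simpa using Nat.le_succ rest.length
    · exact le_trans (ih _ _ _) (Nat.le_succ _)

theorem pvSep_snd_lt (l : List Char) (h : l ≠ []) :
    (pvSepGo [] 0 0 l).2.length < l.length := by
  cases l with
  | nil => exact absurd rfl h
  | cons c rest =>
    simp only [pvSepGo]
    split <;> split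
    · simpa using Nat.lt_succ_self rest.length
    · exact Nat.lt_succ_of_le (pvSepGo_snd_le rest _ _ _)
    · simpa using Nat.lt_succ_self rest.length
    · exact Nat.lt_succ_of_le (pvSepGo_snd_le rest _ _ _)

-- change_to_correct_parenthesis; u[1:-1] is ported by hand as (drop 1).dropLast,
-- which is exact for every length (both give "" when len(u) ≤ 2)
def pvChangeACore (l : List Char) : List Char :=
  if h : l = [] then []
  else
    if pvIsCorrGo [] (pvSepGo [] 0 0 l).1 then
      (pvSepGo [] 0 0 l).1 ++ pvChangeACore (pvSepGo [] 0 0 l).2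
    else
      '(' :: pvChangeACore (pvSepGo [] 0 0 l).2
        ++ ')' :: pvRevGo [] (((pvSepGo [] 0 0 l).1.drop 1).dropLast)
termination_by l.length
decreasing_by all_goals exact pvSep_snd_lt l h

def change_to_correct_parenthesis (balanced_parentheses_string : String) : String :=
  String.mk (pvChangeACore balanced_parentheses_string.toList)

-- ===== PORT B =====

-- _valid: single depth counter, early False when the depth goes negative
def pvValidGo (depth : Int) : List Char → Bool
  | [] => depth == 0
  | c :: rest =>
    if c = '(' then pvValidGo (depth + 1) rest
    else if c = ')' then (if depth - 1 < 0 then false else pvValidGo (depth - 1) rest)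
    else pvValidGo depth rest

-- _flip: filter to parens, map to the opposite paren
def pvFlip (l : List Char) : List Char :=
  l.filterMap (fun c => if c = ')' then some '(' else if c = '(' then some ')' else none)

-- the single segmentation pass: cut each time the running balance returns to 0;
-- cur holds the current segment reversed; a nonempty unfinished tail is one last segment
def pvSegsGo (cur : List Char) (bal : Int) : List Char → List (List Char)
  | [] => if cur = [] then [] else [cur.reverse]
  | c :: rest =>
    let b := bal + (if c = '(' then 1 else -1)
    if b = 0 then (c :: cur).reverse :: pvSegsGo [] 0 rest
    else pvSegsGo (c :: cur) b rest

-- the classification loop body: valid segment → prefix only; else prefix "(" and suffix ")"+flip(seg[1:-1])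
def pvStep (ps_ss : List (List Char) × List (List Char)) (seg : List Char) :
    List (List Char) × List (List Char) :=
  if pvValidGo 0 seg then (ps_ss.1 ++ [seg], ps_ss.2)
  else (ps_ss.1 ++ [['(']], ps_ss.2 ++ [')' :: pvFlip ((seg.drop 1).dropLast)])

def change_to_correct_parenthesis_alt (balanced_parentheses_string : String) : String :=
  let segs := pvSegsGo [] 0 balanced_parentheses_string.toList
  let ps_ss := segs.foldl pvStep ([], [])
  String.mk (ps_ss.1.flatten ++ ps_ss.2.reverse.flatten)

-- ===== PRECONDITION & SPEC =====
def Spec_change_to_correct_parenthesis (balanced_parentheses_string : String) (out : String) : Prop := out = change_to_correct_parenthesis_alt balanced_parentheses_string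
instance (balanced_parentheses_string : String) (out : String) : Decidable (Spec_change_to_correct_parenthesis balanced_parentheses_string out) := by unfold Spec_change_to_correct_parenthesis; infer_instance

-- ===== CLAIM (what is proved, stated in full; the proofs are below) =====
def Claim_equal_change_to_correct_parenthesis : Prop := ∀ (balanced_parentheses_string : String), Dom_change_to_correct_parenthesis balanced_parentheses_string → Spec_change_to_correct_parenthesis balanced_parentheses_string (change_to_correct_parenthesis balanced_parentheses_string)

-- ===== LEMMAS AND PROOFS =====

-- B's one-counter segmentation agrees with repeated separate_to_u_v
theorem segsGo_eq_sep (rest : List Char) : ∀ (acc : List Char) (left right : Int),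
    acc ≠ [] ∨ rest ≠ [] →
    pvSegsGo acc (left - right) rest
      = (pvSepGo acc left right rest).1 :: pvSegsGo [] 0 (pvSepGo acc left right rest).2 := by
  induction rest with
  | nil =>
    intro acc left right h
    rcases h with h | h
    · simp [pvSegsGo, pvSepGo, h]
    · exact absurd rfl h
  | cons c rest ih =>
    intro acc left right _
    simp only [pvSegsGo, pvSepGo]
    by_cases hc : c = '('
    · simp only [hc, if_pos rfl, reduceIte]
      by_cases he : left + 1 = right
      · have hb : left - right + 1 = 0 := by omega
        rw [if_pos hb, if_pos he]
      · have hb : ¬ (left - right + 1 = 0) := by omega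
        rw [if_neg hb, if_neg he]
        have harith : left - right + 1 = (left + 1) - right := by ring
        rw [harith]
        exact ih _ (left + 1) right (Or.inl (by simp))
    · simp only [if_neg hc]
      by_cases he : left = right + 1
      · have hb : left - right + -1 = 0 := by omega
        rw [if_pos hb, if_pos he]
      · have hb : ¬ (left - right + -1 = 0) := by omega
        rw [if_neg hb, if_neg he]
        have harith : left - right + -1 = left - (right + 1) := by ring
        rw [harith]
        exact ih _ left (right + 1) (Or.inl (by simp))

theorem segs_cons (l : List Char) (h : l ≠ []) :
    pvSegsGo [] 0 l = (pvSepGo [] 0 0 l).1 :: pvSegsGo [] 0 (pvSepGo [] 0 0 l).2 := by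
  have := segsGo_eq_sep l [] 0 0 (Or.inr h)
  simpa using this

-- the stack in is_correct_parenthesis only ever holds '(' : depth counter agrees
theorem isCorr_eq_valid (l : List Char) : ∀ (k : ℕ),
    pvIsCorrGo (List.replicate k '(') l = pvValidGo (k : Int) l := by
  induction l with
  | nil =>
    intro k
    cases k with
    | zero => simp [pvIsCorrGo, pvValidGo]
    | succ n =>
      simp only [pvIsCorrGo, pvValidGo]
      have h1 : (List.replicate (n + 1) '(').isEmpty = false := by
        simp [List.replicate_succ]
      have h2 : (((n + 1 : ℕ) : Int) == 0) = false := by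
        simp; omega
      rw [h1, h2]
  | cons c rest ih =>
    intro k
    simp only [pvIsCorrGo, pvValidGo]
    by_cases hc : c = '('
    · simp only [hc, reduceIte]
      have h1 : ('(' : Char) :: List.replicate k '(' = List.replicate (k + 1) '(' := by
        simp [List.replicate_succ]
      rw [h1]
      have := ih (k + 1)
      have h2 : ((k + 1 : ℕ) : Int) = (k : Int) + 1 := by push_cast; ring
      rw [h2] at this
      exact this
    · by_cases hc' : c = ')'
      · simp only [if_neg hc, hc', reduceIte]
        cases k with
        | zero => simp
        | succ n =>
          have hlt : ¬ (((n + 1 : ℕ) : Int) - 1 < 0) := by push_cast; omega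
          simp only [List.replicate_succ, if_neg hlt]
          have h2 : ((n + 1 : ℕ) : Int) - 1 = (n : Int) := by push_cast; ring
          rw [h2]
          exact ih n
      · simp only [if_neg hc, if_neg hc']
        exact ih k

theorem isCorr0 (l : List Char) : pvIsCorrGo [] l = pvValidGo 0 l := by
  simpa using isCorr_eq_valid l 0

-- reverse_parenthesis with accumulator equals _flip
theorem revGo_eq_flip (l : List Char) : ∀ (acc : List Char),
    pvRevGo acc l = acc ++ pvFlip l := by
  induction l with
  | nil => intro acc; simp [pvRevGo, pvFlip]
  | cons c rest ih =>
    intro acc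
    by_cases hc : c = '('
    · simp [pvRevGo, pvFlip, hc, ih]
    · by_cases hc' : c = ')'
      · simp [pvRevGo, pvFlip, hc, hc', ih]
      · simp [pvRevGo, pvFlip, hc, hc', ih]

-- A's recursion written over the segment list
def pvG : List (List Char) → List Char
  | [] => []
  | u :: rest =>
    if pvValidGo 0 u then u ++ pvG rest
    else '(' :: pvG rest ++ ')' :: pvFlip ((u.drop 1).dropLast)

theorem changeA_eq_G_aux (n : ℕ) : ∀ (l : List Char), l.length ≤ n →
    pvChangeACore l = pvG (pvSegsGo [] 0 l) := by
  induction n with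
  | zero =>
    intro l hl
    have h0 : l = [] := List.eq_nil_of_length_eq_zero (Nat.le_zero.mp hl)
    subst h0
    simp [pvChangeACore, pvSegsGo, pvG]
  | succ n ih =>
    intro l hl
    by_cases h : l = []
    · subst h; simp [pvChangeACore, pvSegsGo, pvG]
    · have hv : (pvSepGo [] 0 0 l).2.length ≤ n := by
        have := pvSep_snd_lt l h; omega
      rw [pvChangeACore, dif_neg h, segs_cons l h]
      simp only [pvG]
      rw [ih _ hv, isCorr0, revGo_eq_flip]
      simp

theorem changeA_eq_G (l : List Char) : pvChangeACore l = pvG (pvSegsGo [] 0 l) :=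
  changeA_eq_G_aux l.length l le_rfl

-- the prefix and suffix lists the classification fold builds
def pvF : List (List Char) → List (List Char)
  | [] => []
  | u :: rest => (if pvValidGo 0 u then u else ['(']) :: pvF rest

def pvS : List (List Char) → List (List Char)
  | [] => []
  | u :: rest =>
    if pvValidGo 0 u then pvS rest
    else (')' :: pvFlip ((u.drop 1).dropLast)) :: pvS rest

theorem foldl_step (segs : List (List Char)) : ∀ (ps ss : List (List Char)),
    segs.foldl pvStep (ps, ss) = (ps ++ pvF segs, ss ++ pvS segs) := by
  induction segs with
  | nil => intro ps ss; simp [pvF, pvS]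
  | cons u rest ih =>
    intro ps ss
    by_cases hv : pvValidGo 0 u = true
    · simp [pvStep, pvF, pvS, hv, ih]
    · simp [pvStep, pvF, pvS, hv, ih]

theorem G_eq_join (segs : List (List Char)) :
    pvG segs = (pvF segs).flatten ++ (pvS segs).reverse.flatten := by
  induction segs with
  | nil => simp [pvG, pvF, pvS]
  | cons u rest ih =>
    by_cases hv : pvValidGo 0 u = true
    · simp [pvG, pvF, pvS, hv, ih]
    · simp only [pvG, pvF, pvS, hv, Bool.false_eq_true, ite_false]
      rw [ih]
      simp

-- ===== VERDICT (by name: the statement is the Claim_ definition above) =====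
theorem change_to_correct_parenthesis_spec : Claim_equal_change_to_correct_parenthesis := by
  intro s _
  show change_to_correct_parenthesis s = change_to_correct_parenthesis_alt s
  simp only [change_to_correct_parenthesis, change_to_correct_parenthesis_alt]
  rw [changeA_eq_G, foldl_step, G_eq_join]
  simp
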